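-- pv_equiv track=rewrite | github.com/MoroFernando/Jogo-da-Memoria-com-Python | jogo_da_memoria.py | gerar_lista_letras
-- ===== SOURCE A (Python) =====
-- def gerar_lista_letras(num_linhas, num_colunas):
--
--     matriz_oculta = []
--     valor_ascii = 65
--     contador = 0
--     letras_necessarias = int( (num_linhas * num_colunas) / 2 )
--     tamanho_matriz = int( (num_linhas * num_colunas) )
--
--     for v in range(tamanho_matriz):
--         valor = chr(valor_ascii)
--         matriz_oculta.append(valor)
--         valor_ascii += 1
--         contador += 1
--         if (valor_ascii > 90):
--             valor_ascii = 65
--         if (contador == letras_necessarias):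
--             valor_ascii = 65
--
--     return matriz_oculta
-- ===== SOURCE B (Python) =====
-- def gerar_lista_letras(num_linhas, num_colunas):
--     letras_necessarias = int((num_linhas * num_colunas) / 2)
--     tamanho_matriz = int(num_linhas * num_colunas)
--     return [chr(65 + (i if i < letras_necessarias else i - letras_necessarias) % 26)
--             for i in range(tamanho_matriz)]
-- ===== Notes on version B (the rewrite author's own statement) =====
-- stated objective: simpler
-- what changed: Replaces A's stateful loop (mutable ascii counter with two reset conditionals and a separate contador) by a single comprehension that computes each position's letter directly by closed-form modular arithmetic: position i maps to chr(65 + (i if i < letras else i - letras) % 26).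
import Mathlib
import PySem

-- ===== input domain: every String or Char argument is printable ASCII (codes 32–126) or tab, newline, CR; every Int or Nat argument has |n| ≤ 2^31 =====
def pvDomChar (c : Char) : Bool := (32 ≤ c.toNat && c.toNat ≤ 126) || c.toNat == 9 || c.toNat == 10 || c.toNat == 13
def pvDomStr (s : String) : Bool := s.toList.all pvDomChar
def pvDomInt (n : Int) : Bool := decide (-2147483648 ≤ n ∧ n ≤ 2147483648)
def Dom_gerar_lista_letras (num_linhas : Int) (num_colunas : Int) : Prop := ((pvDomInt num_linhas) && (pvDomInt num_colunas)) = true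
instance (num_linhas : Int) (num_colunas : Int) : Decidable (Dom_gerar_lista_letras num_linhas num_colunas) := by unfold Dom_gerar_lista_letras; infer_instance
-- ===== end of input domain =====

-- B replaces A's mutable ascii counter with reset conditionals by a closed-form
-- modular-arithmetic comprehension over the positions (objective: simpler).

-- Python's `int(p / 2)` goes through FLOAT division: `p / 2` is the IEEE-754 double
-- nearest (ties to even) to the rational p/2, and `int` truncates toward zero.
-- `pyHalfNat a` computes this exactly for a nonnegative integer `a` (|a| ≤ 2^62 here):
-- for a < 2^53 the double a/2 is exact (truncation = Nat division, since a/2 is either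
-- an integer or an exactly representable half-integer, and int() drops the .5);
-- otherwise a/2 ∈ [2^52·…], its ulp is 2^(log2 a - 52) ≥ 1, and we round to nearest,
-- ties to even, which already yields an integer, so truncation is the identity.
def pyHalfNat (a : Nat) : Nat :=
  if a < 2 ^ 53 then a / 2
  else
    let u := 2 ^ (a.log2 - 52)   -- ulp of the double a/2, measured in half-units
    let q := a / u
    let r := a % u
    let q' := if u / 2 < r ∨ (r = u / 2 ∧ q % 2 = 1) then q + 1 else q
    q' * u / 2

-- exact port of Python `int(p / 2)` (float truncation is symmetric around 0)
def pyTruncHalf (p : Int) : Int :=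
  if p < 0 then -(pyHalfNat p.natAbs : Int) else (pyHalfNat p.natAbs : Int)

-- ===== PORT A =====
-- loop body of A, verbatim (state: matriz_oculta, valor_ascii, contador)
def pvStep (letras_necessarias : Int) (st : List String × Int × Int) (_v : Int) :
    List String × Int × Int :=
  let matriz_oculta := st.1 ++ [String.ofList [Char.ofNat st.2.1.toNat]]  -- chr(valor_ascii); always 65..90 here
  let valor_ascii := st.2.1 + 1
  let contador := st.2.2 + 1
  let valor_ascii := if valor_ascii > 90 then (65 : Int) else valor_ascii
  let valor_ascii := if contador = letras_necessarias then (65 : Int) else valor_ascii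
  (matriz_oculta, valor_ascii, contador)

def gerar_lista_letras (num_linhas : Int) (num_colunas : Int) : List String :=
  let letras_necessarias : Int := pyTruncHalf (num_linhas * num_colunas)  -- int((n*m)/2), see pyHalfNat
  let tamanho_matriz : Int := num_linhas * num_colunas                    -- int(n*m) = n*m
  ((PySem.List.pyRange 0 tamanho_matriz 1).foldl (pvStep letras_necessarias) ([], 65, 0)).1

-- ===== PORT B =====
def gerar_lista_letras_alt (num_linhas : Int) (num_colunas : Int) : List String :=
  let letras_necessarias : Int := pyTruncHalf (num_linhas * num_colunas)  -- int((n*m)/2), see pyHalfNat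
  let tamanho_matriz : Int := num_linhas * num_colunas
  (PySem.List.pyRange 0 tamanho_matriz 1).map (fun i =>
    String.ofList [Char.ofNat (65 + PySem.Int.mod (if i < letras_necessarias then i else i - letras_necessarias) 26).toNat])

-- ===== PRECONDITION & SPEC =====
def Spec_gerar_lista_letras (num_linhas : Int) (num_colunas : Int) (out : List String) : Prop := out = gerar_lista_letras_alt num_linhas num_colunas
instance (num_linhas : Int) (num_colunas : Int) (out : List String) : Decidable (Spec_gerar_lista_letras num_linhas num_colunas out) := by unfold Spec_gerar_lista_letras; infer_instance

-- ===== CLAIM (what is proved, stated in full; the proofs are below) =====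
def Claim_equal_gerar_lista_letras : Prop := ∀ (num_linhas : Int) (num_colunas : Int), Dom_gerar_lista_letras num_linhas num_colunas → Spec_gerar_lista_letras num_linhas num_colunas (gerar_lista_letras num_linhas num_colunas)

-- ===== LEMMAS AND PROOFS =====

lemma pyTruncHalf_nonneg (p : Int) (h : 0 ≤ p) : 0 ≤ pyTruncHalf p := by
  unfold pyTruncHalf
  rw [if_neg (by omega)]
  exact Int.natCast_nonneg _

lemma pvMod26 (x : Int) : PySem.Int.mod x 26 = x % 26 :=
  PySem.Int.mod_eq_emod_of_pos (by norm_num)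

-- loop invariant: after n iterations A's state is (B's first n letters, B's ascii offset at n, n)
lemma pvLoop_inv (L : Int) (hL : 0 ≤ L) (n : Nat) :
    (PySem.List.pyRange 0 (n : Int) 1).foldl (pvStep L) ([], 65, 0)
    = ((PySem.List.pyRange 0 (n : Int) 1).map
        (fun i => String.ofList [Char.ofNat (65 + PySem.Int.mod (if i < L then i else i - L) 26).toNat]),
       65 + PySem.Int.mod (if (n : Int) < L then (n : Int) else (n : Int) - L) 26, (n : Int)) := by
  induction n with
  | zero =>
      rw [Int.natCast_zero, PySem.List.pyRange_one_eq_nil le_rfl]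
      simp only [List.foldl_nil, List.map_nil, pvMod26]
      refine Prod.ext rfl (Prod.ext ?_ rfl)
      simp only []
      split_ifs <;> omega
  | succ n ih =>
      have hsplit : PySem.List.pyRange 0 ((n + 1 : Nat) : Int) 1
          = PySem.List.pyRange 0 (n : Int) 1 ++ [(n : Int)] := by
        push_cast
        exact PySem.List.pyRange_one_succ_right (by positivity)
      rw [hsplit, List.foldl_append, List.map_append, ih]
      simp only [List.foldl_cons, List.foldl_nil, List.map_cons, List.map_nil, pvStep, pvMod26]
      refine Prod.ext rfl (Prod.ext ?_ ?_)
      · -- ascii update equals the closed form at n+1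
        simp only []
        push_cast
        split_ifs <;> omega
      · simp only []
        push_cast
        ring

theorem gerar_lista_letras_spec : Claim_equal_gerar_lista_letras := by
  intro nl nc _hdom
  unfold Spec_gerar_lista_letras
  simp only [gerar_lista_letras, gerar_lista_letras_alt]
  by_cases ht : nl * nc ≤ 0
  · rw [PySem.List.pyRange_one_eq_nil ht]
    simp
  · rw [not_le] at ht
    have hL : 0 ≤ pyTruncHalf (nl * nc) := pyTruncHalf_nonneg _ ht.le
    have hcast : ((nl * nc).toNat : Int) = nl * nc := Int.toNat_of_nonneg ht.le
    rw [← hcast, pvLoop_inv _ (hcast ▸ hL)]
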